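-- pv_equiv track=rewrite | github.com/kashyapa/interview-prep | revise-daily/may8/dp.py | find_minimum_cuts
-- ===== SOURCE A (Python) =====
-- def find_minimum_cuts(s):
--     if not s:
--         return 0
--
--     def is_palindromic(s):
--         return s == s[::-1]
--
--     min_cuts = len(s)
--
--     for i in range(len(s)):
--         substr = s[:i+1]
--         if is_palindromic(substr):
--             min_cuts = 1 + find_minimum_cuts(s[i+1:])
--     return min_cuts
-- ===== SOURCE B (Python) =====
-- def find_minimum_cuts(s):
--     count = 0
--     while s:
--         k = len(s)
--         while s[:k] != s[:k][::-1]: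
--             k -= 1
--         s = s[k:]
--         count += 1
--     return count
-- ===== Notes on version B (the rewrite author's own statement) =====
-- stated objective: faster
-- what changed: A recurses on every palindromic-prefix split (exponential, and its overwritten 'min' means only the longest prefix counts); B iteratively strips the longest palindromic prefix and counts the steps, no recursion.
import Mathlib
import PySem

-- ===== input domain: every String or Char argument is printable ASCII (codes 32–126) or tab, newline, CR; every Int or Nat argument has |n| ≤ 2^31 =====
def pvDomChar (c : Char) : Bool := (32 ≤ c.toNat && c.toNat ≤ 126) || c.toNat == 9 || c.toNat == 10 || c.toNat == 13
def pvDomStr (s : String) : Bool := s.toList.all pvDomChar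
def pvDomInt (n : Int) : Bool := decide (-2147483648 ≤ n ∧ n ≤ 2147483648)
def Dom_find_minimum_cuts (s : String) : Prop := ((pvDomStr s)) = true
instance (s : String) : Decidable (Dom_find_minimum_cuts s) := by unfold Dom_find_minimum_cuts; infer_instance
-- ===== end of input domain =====

-- B replaces A's branching recursion (whose overwritten "min" makes it count greedy
-- longest-palindromic-prefix strips) by a direct iterative strip loop; objective: faster
-- (a timing run measured B faster at the largest size where A still finished).

-- ===== PORT A =====
-- A's code, on the character list: 'if not s: return 0'; then for i in range(len(s)),
-- if s[:i+1] == s[:i+1][::-1] (reversal slice ported as List.reverse, exact) the loop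
-- variable min_cuts (initially len(s)) is overwritten by 1 + recursion on s[i+1:].
def findAList (l : List Char) : Int :=
  if l = [] then 0
  else
    (List.range l.length).attach.foldl
      (fun mc i =>
        if l.take (i.1 + 1) = (l.take (i.1 + 1)).reverse then
          1 + findAList (l.drop (i.1 + 1))
        else mc)
      (l.length : Int)
termination_by l.length
decreasing_by
  have hi : i.1 < l.length := List.mem_range.mp i.2
  simp only [List.length_drop]
  omega

def find_minimum_cuts (s : String) : Int := findAList s.toList

-- ===== PORT B =====
-- B's inner while loop: decrement k from len(s) until s[:k] is a palindrome.
def stripLen (l : List Char) (k : Nat) : Nat :=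
  if h : l.take k = (l.take k).reverse then k
  else stripLen l (k - 1)
termination_by k
decreasing_by
  cases k with
  | zero => simp at h
  | succ n => omega

-- B's outer while loop: strip the longest palindromic prefix, count the steps.
theorem stripLen_pos (l : List Char) (hl : l ≠ []) :
    ∀ k, 1 ≤ k → 1 ≤ stripLen l k := by
  intro k
  induction k with
  | zero => intro h; omega
  | succ n ih =>
    intro _
    rw [stripLen]
    split
    · omega
    · rename_i h
      cases n with
      | zero =>
        exfalso
        obtain ⟨c, t, rfl⟩ := List.exists_cons_of_ne_nil hl
        simp at h
      | succ m => exact ih (by omega)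

def findAltList (l : List Char) : Int :=
  if h : l = [] then 0
  else 1 + findAltList (l.drop (stripLen l l.length))
termination_by l.length
decreasing_by
  have hlen : 1 ≤ l.length := by
    cases l with | nil => exact absurd rfl h | cons a t => simp
  have h1 : 1 ≤ stripLen l l.length := stripLen_pos l h l.length hlen
  simp only [List.length_drop]
  omega

def find_minimum_cuts_alt (s : String) : Int := findAltList s.toList

-- ===== PRECONDITION & SPEC =====
def Spec_find_minimum_cuts (s : String) (out : Int) : Prop := out = find_minimum_cuts_alt s
instance (s : String) (out : Int) : Decidable (Spec_find_minimum_cuts s out) := by unfold Spec_find_minimum_cuts; infer_instance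

-- ===== CLAIM (what is proved, stated in full; the proofs are below) =====
def Claim_equal_find_minimum_cuts : Prop := ∀ (s : String), Dom_find_minimum_cuts s → Spec_find_minimum_cuts s (find_minimum_cuts s)

-- ===== LEMMAS AND PROOFS =====

theorem stripLen_succ_neg (l : List Char) (k : Nat)
    (h : ¬ l.take (k + 1) = (l.take (k + 1)).reverse) :
    stripLen l (k + 1) = stripLen l k := by
  rw [stripLen, dif_neg h]
  congr 1

theorem take_one_pal (l : List Char) (hl : l ≠ []) :
    l.take 1 = (l.take 1).reverse := by
  obtain ⟨c, t, rfl⟩ := List.exists_cons_of_ne_nil hl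
  simp

-- A's for-loop over range k equals "1 + A on the remainder after the longest
-- palindromic prefix of length ≤ k", for any start value mc (the last hit wins).
theorem fold_eq (l : List Char) (hl : l ≠ []) :
    ∀ k, 1 ≤ k → ∀ mc : Int,
      (List.range k).foldl
        (fun mc i =>
          if l.take (i + 1) = (l.take (i + 1)).reverse then
            1 + findAList (l.drop (i + 1))
          else mc) mc
      = 1 + findAList (l.drop (stripLen l k)) := by
  intro k
  induction k with
  | zero => intro h; omega
  | succ n ih =>
    intro _ mc
    rw [List.range_succ, List.foldl_append]
    cases n with
    | zero =>
      simp only [List.range_zero, List.foldl_nil, List.foldl_cons]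
      rw [if_pos (take_one_pal l hl)]
      rw [stripLen, dif_pos (take_one_pal l hl)]
    | succ m =>
      rw [ih (by omega) mc]
      simp only [List.foldl_cons, List.foldl_nil]
      by_cases h : l.take (m + 1 + 1) = (l.take (m + 1 + 1)).reverse
      · rw [if_pos h, stripLen, dif_pos h]
      · rw [if_neg h, stripLen_succ_neg l (m + 1) h]

theorem foldl_attach_eq {α β : Type} (l : List α) (g : β → α → β) (b : β) :
    l.attach.foldl (fun acc i => g acc i.1) b = l.foldl g b := List.foldl_attach

theorem main_eq : ∀ n (l : List Char), l.length = n → findAList l = findAltList l := by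
  intro n
  induction n using Nat.strong_induction_on with
  | _ n ih =>
    intro l hn
    by_cases hl : l = []
    · subst hl
      rw [findAList, findAltList]; simp
    · rw [findAList, findAltList]
      rw [if_neg hl, dif_neg hl]
      have hlen : 1 ≤ l.length := by
        cases l with | nil => exact absurd rfl hl | cons a t => simp
      have hA : (List.range l.length).attach.foldl
          (fun (mc : Int) (i : {x // x ∈ List.range l.length}) =>
            if l.take (i.1 + 1) = (l.take (i.1 + 1)).reverse then
              1 + findAList (l.drop (i.1 + 1)) else mc)
          (l.length : Int)
          = (List.range l.length).foldl
          (fun (mc : Int) (i : Nat) =>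
            if l.take (i + 1) = (l.take (i + 1)).reverse then
              1 + findAList (l.drop (i + 1)) else mc)
          (l.length : Int) :=
        foldl_attach_eq (List.range l.length)
          (fun (mc : Int) (i : Nat) =>
            if l.take (i + 1) = (l.take (i + 1)).reverse then
              1 + findAList (l.drop (i + 1)) else mc)
          (l.length : Int)
      rw [hA, fold_eq l hl l.length hlen]
      congr 1
      have h1 : 1 ≤ stripLen l l.length := stripLen_pos l hl l.length hlen
      exact ih (l.drop (stripLen l l.length)).length
        (by simp only [List.length_drop]; omega)
        _ rfl

-- ===== VERDICT (by name: the statement is the Claim_ definition above) =====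
theorem find_minimum_cuts_spec : Claim_equal_find_minimum_cuts := by
  intro s _
  unfold Spec_find_minimum_cuts find_minimum_cuts find_minimum_cuts_alt
  exact main_eq s.toList.length s.toList rfl
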